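-- pv_equiv track=rewrite | github.com/Imessal/dns | server.py | merge_addresses
-- ===== SOURCE A (Python) =====
-- from collections import defaultdict
--
-- def merge_addresses(addresses):
--     result_dict = defaultdict(dict)
--     for name, addr, type in addresses:
--         result_dict[name][type] = []
--     for name, addr, type in addresses:
--         if name in result_dict.keys():
--             if type in result_dict[name].keys():
--                 result_dict[name][type].append(addr)
--     return result_dict
-- ===== SOURCE B (Python) =====
-- from collections import defaultdict
--
-- def merge_addresses(addresses):
--     result_dict = defaultdict(dict)
--     for name in dict.fromkeys(n for n, _, _ in addresses):
--         rows = [(a, t) for m, a, t in addresses if m == name]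
--         result_dict[name] = {
--             t: [a for a, tt in rows if tt == t]
--             for t in dict.fromkeys(t for _, t in rows)
--         }
--     return result_dict
-- ===== Notes on version B (the rewrite author's own statement) =====
-- stated objective: alternative
-- what changed: Replaces A's two dict-mutating passes (seed every (name,type) slot empty, then append behind always-true membership guards) with a declarative grouping: deduplicate the names, and for each name build its inner dict in one shot as a comprehension over the deduplicated types, each slot filled by filtering; it trades A's O(n) incremental mutation for O(n*k) filtering scans over the distinct keys.
import Mathlib
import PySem

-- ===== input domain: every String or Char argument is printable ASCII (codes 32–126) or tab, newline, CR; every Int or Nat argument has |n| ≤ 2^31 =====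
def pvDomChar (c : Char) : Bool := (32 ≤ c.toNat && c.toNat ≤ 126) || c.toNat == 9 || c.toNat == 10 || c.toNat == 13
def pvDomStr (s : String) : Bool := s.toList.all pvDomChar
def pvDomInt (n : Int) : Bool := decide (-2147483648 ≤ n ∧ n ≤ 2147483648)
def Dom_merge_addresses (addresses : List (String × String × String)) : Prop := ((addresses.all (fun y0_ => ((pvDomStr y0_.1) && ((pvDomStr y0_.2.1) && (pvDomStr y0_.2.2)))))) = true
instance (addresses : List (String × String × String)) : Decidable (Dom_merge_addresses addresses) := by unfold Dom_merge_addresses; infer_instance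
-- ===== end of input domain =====

-- B replaces A's two dict-mutating passes by a declarative grouping (dedup the names,
-- then per name a dict comprehension over the deduped types, filling each slot by a
-- filtering comprehension); objective: simpler.

-- ===== PORT A =====
-- pass 1: result_dict[name][type] = []   (defaultdict access creates the inner dict)
def pvA1 (d : PySem.Dict String (PySem.Dict String (List String))) (x : String × String × String) :
    PySem.Dict String (PySem.Dict String (List String)) :=
  d.modify x.1 PySem.Dict.empty (fun inner => inner.insert x.2.2 [])

-- pass 2: if name in keys: if type in keys: result_dict[name][type].append(addr)
def pvA2 (d : PySem.Dict String (PySem.Dict String (List String))) (x : String × String × String) :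
    PySem.Dict String (PySem.Dict String (List String)) :=
  if d.contains x.1 then
    if (d.getD x.1 PySem.Dict.empty).contains x.2.2 then
      d.modify x.1 PySem.Dict.empty (fun inner => inner.modify x.2.2 [] (fun l => l ++ [x.2.1]))
    else d
  else d

def merge_addresses (addresses : List (String × String × String)) : List (String × List (String × List String)) :=
  ((addresses.foldl pvA2 (addresses.foldl pvA1 PySem.Dict.empty)).items.map (fun p => (p.1, p.2.items)))

-- ===== PORT B =====
-- for name in dict.fromkeys(names): rows = [(a,t) … if m == name];
--   result_dict[name] = {t: [a for a,tt in rows if tt == t] for t in dict.fromkeys(types)}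
def merge_addresses_alt (addresses : List (String × String × String)) : List (String × List (String × List String)) :=
  (PySem.List.dedup (addresses.map (fun x => x.1))).map (fun name =>
    let rows := (addresses.filter (fun x => x.1 == name)).map (fun x => (x.2.1, x.2.2))
    (name,
      (PySem.List.dedup (rows.map (fun r => r.2))).map (fun t =>
        (t, (rows.filter (fun r => r.2 == t)).map (fun r => r.1)))))

-- ===== PRECONDITION & SPEC =====
def Spec_merge_addresses (addresses : List (String × String × String)) (out : List (String × List (String × List String))) : Prop := out = merge_addresses_alt addresses
instance (addresses : List (String × String × String)) (out : List (String × List (String × List String))) : Decidable (Spec_merge_addresses addresses out) := by unfold Spec_merge_addresses; infer_instance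

-- ===== CLAIM (what is proved, stated in full; the proofs are below) =====
def Claim_equal_merge_addresses : Prop := ∀ (addresses : List (String × String × String)), Dom_merge_addresses addresses → Spec_merge_addresses addresses (merge_addresses addresses)

-- ===== LEMMAS AND PROOFS =====

-- the unguarded pass-2 step (the guards of pvA2 hold after pass 1)
def pvM (d : PySem.Dict String (PySem.Dict String (List String))) (x : String × String × String) :
    PySem.Dict String (PySem.Dict String (List String)) :=
  d.modify x.1 PySem.Dict.empty (fun inner => inner.modify x.2.2 [] (fun l => l ++ [x.2.1]))

-- (name, type) of x is present in d
def pvHas (d : PySem.Dict String (PySem.Dict String (List String))) (x : String × String × String) : Prop :=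
  d.contains x.1 = true ∧ (d.getD x.1 PySem.Dict.empty).contains x.2.2 = true

theorem pv_update_of_subset {α : Type} [BEq α] [LawfulBEq α] (l : List α) (s : PySem.Set α)
    (h : ∀ x ∈ l, x ∈ s) : PySem.Set.update s l = s := by
  induction l generalizing s with
  | nil => rfl
  | cons x l ih =>
    rw [PySem.Set.update_cons, PySem.Set.add_of_mem (h x (by simp))]
    exact ih s (fun y hy => h y (by simp [hy]))

theorem pv_getD_foldl_A1 (l : List (String × String × String))
    (d : PySem.Dict String (PySem.Dict String (List String))) (n : String) :
    (l.foldl pvA1 d).getD n PySem.Dict.empty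
      = (l.filter (fun x => x.1 == n)).foldl
          (fun inner x => inner.insert x.2.2 []) (d.getD n PySem.Dict.empty) := by
  induction l generalizing d with
  | nil => rfl
  | cons x l ih =>
    rw [List.foldl_cons, ih, List.filter_cons]
    by_cases h : x.1 = n
    · simp only [h, beq_self_eq_true, if_pos, List.foldl_cons]
      rw [pvA1, ← h, PySem.Dict.getD_modify_self]
    · have hb : (x.1 == n) = false := by simp [h]
      simp only [hb, Bool.false_eq_true, if_false]
      rw [pvA1, PySem.Dict.getD_modify_of_ne _ _ _ (fun he => h he.symm)]

theorem pv_getD_foldl_M (l : List (String × String × String))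
    (d : PySem.Dict String (PySem.Dict String (List String))) (n : String) :
    (l.foldl pvM d).getD n PySem.Dict.empty
      = (l.filter (fun x => x.1 == n)).foldl
          (fun inner x => inner.modify x.2.2 [] (fun v => v ++ [x.2.1]))
          (d.getD n PySem.Dict.empty) := by
  induction l generalizing d with
  | nil => rfl
  | cons x l ih =>
    rw [List.foldl_cons, ih, List.filter_cons]
    by_cases h : x.1 = n
    · simp only [h, beq_self_eq_true, if_pos, List.foldl_cons]
      rw [pvM, ← h, PySem.Dict.getD_modify_self]
    · have hb : (x.1 == n) = false := by simp [h]
      simp only [hb, Bool.false_eq_true, if_false]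
      rw [pvM, PySem.Dict.getD_modify_of_ne _ _ _ (fun he => h he.symm)]

theorem pv_keys_foldl_A1 (l : List (String × String × String))
    (d : PySem.Dict String (PySem.Dict String (List String))) :
    (l.foldl pvA1 d).keys = PySem.Set.update d.keys (l.map (fun x => x.1)) :=
  PySem.Dict.keys_foldl_modify_key l (fun x => x.1) PySem.Dict.empty
    (fun _ x inner => inner.insert x.2.2 []) d

theorem pv_keys_foldl_M (l : List (String × String × String))
    (d : PySem.Dict String (PySem.Dict String (List String))) :
    (l.foldl pvM d).keys = PySem.Set.update d.keys (l.map (fun x => x.1)) :=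
  PySem.Dict.keys_foldl_modify_key l (fun x => x.1) PySem.Dict.empty
    (fun _ x inner => inner.modify x.2.2 [] (fun v => v ++ [x.2.1])) d

theorem pv_keys_foldl_ins (l : List (String × String × String))
    (d : PySem.Dict String (List String)) :
    (l.foldl (fun inner x => inner.insert x.2.2 ([] : List String)) d).keys
      = PySem.Set.update d.keys (l.map (fun x => x.2.2)) :=
  PySem.Dict.keys_foldl_insert_key l (fun x => x.2.2) (fun _ _ => []) d

theorem pv_keys_foldl_mod (l : List (String × String × String))
    (d : PySem.Dict String (List String)) :
    (l.foldl (fun inner x => inner.modify x.2.2 [] (fun v => v ++ [x.2.1])) d).keys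
      = PySem.Set.update d.keys (l.map (fun x => x.2.2)) :=
  PySem.Dict.keys_foldl_modify_key l (fun x => x.2.2) [] (fun _ x v => v ++ [x.2.1]) d

theorem pv_getD_foldl_insert_nil (l : List (String × String × String))
    (d : PySem.Dict String (List String)) (t : String) (h : d.getD t [] = []) :
    (l.foldl (fun inner x => inner.insert x.2.2 ([] : List String)) d).getD t [] = [] := by
  induction l generalizing d with
  | nil => exact h
  | cons x l ih =>
    rw [List.foldl_cons]
    refine ih _ ?_
    rw [PySem.Dict.getD_insert]
    split_ifs <;> simp [h]

-- pvM only adds keys/inner keys, so pvHas is preserved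
theorem pv_has_M (d : PySem.Dict String (PySem.Dict String (List String)))
    (x y : String × String × String) (h : pvHas d x) : pvHas (pvM d y) x := by
  obtain ⟨h1, h2⟩ := h
  unfold pvHas pvM
  constructor
  · rw [PySem.Dict.contains_modify]; simp [h1]
  · by_cases he : x.1 = y.1
    · rw [he, PySem.Dict.getD_modify_self, PySem.Dict.contains_modify]
      rw [he] at h2; simp [h2]
    · rw [PySem.Dict.getD_modify_of_ne _ _ _ he]; exact h2

theorem pv_foldl_guard (l : List (String × String × String))
    (d : PySem.Dict String (PySem.Dict String (List String)))
    (h : ∀ x ∈ l, pvHas d x) : l.foldl pvA2 d = l.foldl pvM d := by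
  induction l generalizing d with
  | nil => rfl
  | cons x l ih =>
    have hx := h x (by simp)
    have hstep : pvA2 d x = pvM d x := by
      unfold pvA2 pvM; rw [if_pos hx.1, if_pos hx.2]
    rw [List.foldl_cons, List.foldl_cons, hstep]
    exact ih (pvM d x) (fun y hy => pv_has_M d y x (h y (by simp [hy])))

theorem pv_has_D1 (addresses : List (String × String × String))
    (x : String × String × String) (hx : x ∈ addresses) :
    pvHas (addresses.foldl pvA1 PySem.Dict.empty) x := by
  constructor
  · rw [PySem.Dict.contains_iff_mem_keys, pv_keys_foldl_A1]
    simp only [PySem.Dict.keys_empty, PySem.Set.update_nil_left, PySem.Set.mem_ofList]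
    exact List.mem_map.mpr ⟨x, hx, rfl⟩
  · rw [pv_getD_foldl_A1, PySem.Dict.getD_empty, PySem.Dict.contains_iff_mem_keys,
      pv_keys_foldl_ins]
    simp only [PySem.Dict.keys_empty, PySem.Set.update_nil_left, PySem.Set.mem_ofList]
    exact List.mem_map.mpr ⟨x, List.mem_filter.mpr ⟨hx, by simp⟩, rfl⟩

-- the inner dict at name n, in both its key list and its slots
theorem pv_inner_items (addresses : List (String × String × String)) (n : String) :
    ((addresses.filter (fun x => x.1 == n)).foldl
        (fun inner x => inner.modify x.2.2 [] (fun v => v ++ [x.2.1]))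
        ((addresses.filter (fun x => x.1 == n)).foldl
          (fun inner x => inner.insert x.2.2 []) PySem.Dict.empty)).items
      = (PySem.Set.ofList ((addresses.filter (fun x => x.1 == n)).map (fun x => x.2.2))).map
          (fun t => (t, ((addresses.filter (fun x => x.1 == n)).filter
              (fun x => x.2.2 == t)).map (fun x => x.2.1))) := by
  set filt := addresses.filter (fun x => x.1 == n) with hfilt
  set I1 := filt.foldl (fun inner x => inner.insert x.2.2 ([] : List String)) PySem.Dict.empty with hI1
  have hkeysI1 : I1.keys = PySem.Set.ofList (filt.map (fun x => x.2.2)) := by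
    rw [hI1, pv_keys_foldl_ins, PySem.Dict.keys_empty, PySem.Set.update_nil_left]
  have hkeys : (filt.foldl (fun inner x => inner.modify x.2.2 [] (fun v => v ++ [x.2.1])) I1).keys
      = PySem.Set.ofList (filt.map (fun x => x.2.2)) := by
    rw [pv_keys_foldl_mod, hkeysI1]
    exact pv_update_of_subset _ _ (fun t ht => (PySem.Set.mem_ofList _ _).mpr ht)
  have hnd : (filt.foldl (fun inner x => inner.modify x.2.2 [] (fun v => v ++ [x.2.1])) I1).keys.Nodup := by
    rw [hkeys]; exact PySem.Set.nodup_ofList _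
  rw [PySem.Dict.items_eq_map_keys _ hnd [], hkeys]
  apply List.map_congr_left
  intro t _
  congr 1
  -- the slot at t: fold as a fold over (type, addr) pairs, then the append lemma
  have hmap : filt.foldl (fun inner x => inner.modify x.2.2 [] (fun v => v ++ [x.2.1])) I1
      = (filt.map (fun x => (x.2.2, x.2.1))).foldl
          (fun d p => d.modify p.1 [] (fun v => v ++ [p.2])) I1 := by
    rw [List.foldl_map]
  rw [hmap, PySem.Dict.getD_foldl_modify_append,
    pv_getD_foldl_insert_nil _ _ _ (by rw [PySem.Dict.getD_empty]), List.nil_append,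
    List.filter_map, List.map_map]
  simp [Function.comp_def]

-- the same inner dict, phrased on B's (addr, type) rows
theorem pv_inner_items_B (addresses : List (String × String × String)) (n : String) :
    ((addresses.filter (fun x => x.1 == n)).foldl
        (fun inner x => inner.modify x.2.2 [] (fun v => v ++ [x.2.1]))
        ((addresses.filter (fun x => x.1 == n)).foldl
          (fun inner x => inner.insert x.2.2 []) PySem.Dict.empty)).items
      = (PySem.Set.ofList (((addresses.filter (fun x => x.1 == n)).map
            (fun x => (x.2.1, x.2.2))).map (fun r => r.2))).map
          (fun t => (t, (((addresses.filter (fun x => x.1 == n)).map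
              (fun x => (x.2.1, x.2.2))).filter (fun r => r.2 == t)).map (fun r => r.1))) := by
  rw [pv_inner_items]
  have hmaps : ((addresses.filter (fun x => x.1 == n)).map (fun x => (x.2.1, x.2.2))).map
      (fun r => r.2) = (addresses.filter (fun x => x.1 == n)).map (fun x => x.2.2) := by
    simp [List.map_map, Function.comp_def]
  rw [hmaps]
  apply List.map_congr_left
  intro t _
  rw [List.filter_map, List.map_map]
  simp [Function.comp_def]

theorem pv_final (addresses : List (String × String × String)) :
    merge_addresses addresses = merge_addresses_alt addresses := by
  unfold merge_addresses merge_addresses_alt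
  rw [pv_foldl_guard addresses _ (pv_has_D1 addresses)]
  set F := addresses.foldl pvM (addresses.foldl pvA1 PySem.Dict.empty) with hF
  have hkeys : F.keys = PySem.Set.ofList (addresses.map (fun x => x.1)) := by
    rw [hF, pv_keys_foldl_M, pv_keys_foldl_A1, PySem.Dict.keys_empty, PySem.Set.update_nil_left]
    exact pv_update_of_subset _ _ (fun y hy => (PySem.Set.mem_ofList _ _).mpr hy)
  have hnd : F.keys.Nodup := by rw [hkeys]; exact PySem.Set.nodup_ofList _
  rw [PySem.Dict.items_eq_map_keys F hnd PySem.Dict.empty, hkeys, List.map_map,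
    PySem.List.dedup_eq_ofList]
  apply List.map_congr_left
  intro n _
  simp only [Function.comp]
  congr 1
  rw [hF, pv_getD_foldl_M, pv_getD_foldl_A1, PySem.Dict.getD_empty, pv_inner_items_B,
    PySem.List.dedup_eq_ofList]

-- ===== VERDICT (by name: the statement is the Claim_ definition above) =====
theorem merge_addresses_spec : Claim_equal_merge_addresses := by
  intro addresses _
  unfold Spec_merge_addresses
  exact pv_final addresses
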